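-- pv_equiv track=rewrite | github.com/dbamman/NAACL2019-literary-entities | scripts/convert_brat_to_tsv.py | splitWithIndices
-- ===== SOURCE A (Python) =====
-- from itertools import groupby
--
-- def splitWithIndices(text):
-- 	p = 0
-- 	idx = 0
-- 	for k, g in groupby(text, lambda x: x==' ' or x=='\n'):
-- 		q = p + sum(1 for i in g)
-- 		if not k:
-- 			yield p, q, idx
-- 			idx += 1
-- 		p = q
-- ===== SOURCE B (Python) =====
-- def splitWithIndices(text):
--     start = None
--     idx = 0
--     for i, c in enumerate(text):
--         if c == ' ' or c == '\n':
--             if start is not None: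
--                 yield start, i, idx
--                 idx += 1
--                 start = None
--         else:
--             if start is None:
--                 start = i
--     if start is not None:
--         yield start, len(text), idx
-- ===== Notes on version B (the rewrite author's own statement) =====
-- stated objective: idiomatic
-- what changed: Replaces itertools.groupby run grouping with per-run length summation by a single hand-written state-machine loop over enumerate(text) that records a token's start index and yields it when a separator (or end of string) ends it.
import Mathlib
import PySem

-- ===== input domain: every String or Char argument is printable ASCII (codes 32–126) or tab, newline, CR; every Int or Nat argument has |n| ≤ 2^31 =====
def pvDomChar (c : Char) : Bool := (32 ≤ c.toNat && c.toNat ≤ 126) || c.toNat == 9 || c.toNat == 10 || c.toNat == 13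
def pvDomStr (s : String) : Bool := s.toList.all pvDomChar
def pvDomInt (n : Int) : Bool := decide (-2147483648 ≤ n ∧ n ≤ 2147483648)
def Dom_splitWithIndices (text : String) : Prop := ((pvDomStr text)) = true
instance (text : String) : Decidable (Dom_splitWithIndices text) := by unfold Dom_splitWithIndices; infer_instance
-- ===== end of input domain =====

-- B replaces A's groupby run-length grouping with a single-pass state-machine loop
-- that tracks the current token's start index (objective: idiomatic; same behaviour).

-- separator predicate: x == ' ' or x == '\n'
def pvKey (c : Char) : Bool := c == ' ' || c == '\n'

-- ===== PORT A =====
-- A iterates groupby(text, key): each group is a maximal run of equal key;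
-- q = p + len(group); non-separator groups yield (p, q, idx).
def pvGoA : List Char → Int → Int → List (Int × Int × Int)
  | [], _, _ => []
  | c :: cs, p, idx =>
    let k := pvKey c
    let run := cs.takeWhile (fun d => pvKey d == k)
    let rest := cs.dropWhile (fun d => pvKey d == k)
    let q := p + 1 + (run.length : Int)
    if k then pvGoA rest q idx
    else (p, q, idx) :: pvGoA rest q (idx + 1)
termination_by cs _ _ => cs.length
decreasing_by
  all_goals
    simp only [List.length_cons]
    exact Nat.lt_succ_of_le (List.length_dropWhile_le _ _)

def splitWithIndices (text : String) : List (Int × Int × Int) :=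
  pvGoA text.toList 0 0

-- ===== PORT B =====
-- B walks the characters once with (position, optional token start, idx) state,
-- emitting (start, i, idx) when a separator ends a token, flushing at the end.
def pvGoB : List Char → Int → Option Int → Int → List (Int × Int × Int)
  | [], n, st, idx =>
    match st with
    | none => []
    | some s => [(s, n, idx)]
  | c :: cs, i, st, idx =>
    if pvKey c then
      match st with
      | some s => (s, i, idx) :: pvGoB cs (i + 1) none (idx + 1)
      | none => pvGoB cs (i + 1) none idx
    else
      match st with
      | some s => pvGoB cs (i + 1) (some s) idx
      | none => pvGoB cs (i + 1) (some i) idx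

def splitWithIndices_alt (text : String) : List (Int × Int × Int) :=
  pvGoB text.toList 0 none 0

-- ===== PRECONDITION & SPEC =====
def Spec_splitWithIndices (text : String) (out : List (Int × Int × Int)) : Prop := out = splitWithIndices_alt text
instance (text : String) (out : List (Int × Int × Int)) : Decidable (Spec_splitWithIndices text out) := by unfold Spec_splitWithIndices; infer_instance

-- ===== CLAIM (what is proved, stated in full; the proofs are below) =====
def Claim_equal_splitWithIndices : Prop := ∀ (text : String), Dom_splitWithIndices text → Spec_splitWithIndices text (splitWithIndices text)

-- ===== LEMMAS AND PROOFS =====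

-- head of a dropWhile residue fails the predicate
theorem pvDropHead {p : Char → Bool} {l : List Char} {x : Char} {xs : List Char}
    (h : l.dropWhile p = x :: xs) : p x = false := by
  induction l with
  | nil => simp at h
  | cons a as ih =>
    by_cases ha : p a
    · rw [List.dropWhile_cons_of_pos ha] at h; exact ih h
    · rw [List.dropWhile_cons_of_neg (by simp [ha])] at h
      cases h; simpa using ha

-- while in "no token" state, B skips a run of separators in one step
theorem pvGoB_skip (cs : List Char) (i idx : Int) :
    pvGoB cs i none idx =
      pvGoB (cs.dropWhile pvKey) (i + ((cs.takeWhile pvKey).length : Int)) none idx := by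
  induction cs generalizing i with
  | nil => simp
  | cons c cs ih =>
    by_cases hk : pvKey c
    · rw [List.takeWhile_cons_of_pos hk, List.dropWhile_cons_of_pos hk]
      have h1 : pvGoB (c :: cs) i none idx = pvGoB cs (i + 1) none idx := by
        simp [pvGoB, hk]
      rw [h1, ih]
      congr 1
      simp only [List.length_cons]
      push_cast; ring
    · rw [List.takeWhile_cons_of_neg (by simp [hk]), List.dropWhile_cons_of_neg (by simp [hk])]
      simp

-- while in a token started at s, B consumes the non-separator run, then emits
theorem pvGoB_token (cs : List Char) (i s idx : Int) :
    pvGoB cs i (some s) idx =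
      (s, i + ((cs.takeWhile (fun d => !pvKey d)).length : Int), idx) ::
        (match cs.dropWhile (fun d => !pvKey d) with
         | [] => []
         | _ :: rs =>
             pvGoB rs (i + ((cs.takeWhile (fun d => !pvKey d)).length : Int) + 1) none (idx + 1)) := by
  induction cs generalizing i with
  | nil => simp [pvGoB]
  | cons c cs ih =>
    by_cases hk : pvKey c
    · rw [List.takeWhile_cons_of_neg (by simp [hk]), List.dropWhile_cons_of_neg (by simp [hk])]
      simp [pvGoB, hk]
    · rw [List.takeWhile_cons_of_pos (by simp [hk]), List.dropWhile_cons_of_pos (by simp [hk])]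
      have h1 : pvGoB (c :: cs) i (some s) idx = pvGoB cs (i + 1) (some s) idx := by
        simp [pvGoB, hk]
      have harith : i + 1 + ((cs.takeWhile (fun d => !pvKey d)).length : Int)
          = i + (((c :: cs.takeWhile (fun d => !pvKey d)).length : Nat) : Int) := by
        simp only [List.length_cons]; push_cast; ring
      rw [h1, ih, harith]

-- main agreement lemma, by strong induction on the list length
theorem pvMain : ∀ (n : Nat) (cs : List Char), cs.length ≤ n → ∀ (p idx : Int),
    pvGoA cs p idx = pvGoB cs p none idx := by
  intro n
  induction n with
  | zero =>
    intro cs h p idx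
    have : cs = [] := List.eq_nil_of_length_eq_zero (Nat.le_zero.mp h)
    subst this; simp [pvGoA, pvGoB]
  | succ n ih =>
    intro cs h p idx
    cases cs with
    | nil => simp [pvGoA, pvGoB]
    | cons c cs =>
      have hcs : cs.length ≤ n := by simpa using h
      by_cases hk : pvKey c
      · -- separator group
        have hA : pvGoA (c :: cs) p idx
            = pvGoA (cs.dropWhile pvKey)
                (p + 1 + ((cs.takeWhile pvKey).length : Int)) idx := by
          simp [pvGoA, hk]
        have hB : pvGoB (c :: cs) p none idx = pvGoB cs (p + 1) none idx := by
          simp [pvGoB, hk]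
        rw [hA, hB, pvGoB_skip]
        exact ih _ (le_trans (List.length_dropWhile_le _ _) hcs) _ _
      · -- token group
        have hA : pvGoA (c :: cs) p idx
            = (p, p + 1 + ((cs.takeWhile (fun d => !pvKey d)).length : Int), idx)
                :: pvGoA (cs.dropWhile (fun d => !pvKey d))
                    (p + 1 + ((cs.takeWhile (fun d => !pvKey d)).length : Int)) (idx + 1) := by
          simp [pvGoA, hk]
        have hB : pvGoB (c :: cs) p none idx = pvGoB cs (p + 1) (some p) idx := by
          simp [pvGoB, hk]
        rw [hA, hB, pvGoB_token]
        have hadd : p + 1 + ((cs.takeWhile (fun d => !pvKey d)).length : Int)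
            = p + 1 + ((cs.takeWhile (fun d => !pvKey d)).length : Int) := rfl
        congr 1
        cases hrest : cs.dropWhile (fun d => !pvKey d) with
        | nil => simp [pvGoA]
        | cons r rs =>
          have hr : pvKey r = true := by
            have := pvDropHead hrest; simpa using this
          have hlen : (r :: rs).length ≤ n :=
            le_trans (by rw [← hrest]; exact List.length_dropWhile_le _ _) hcs
          rw [ih (r :: rs) hlen (p + 1 + ((cs.takeWhile (fun d => !pvKey d)).length : Int)) (idx + 1)]
          simp [pvGoB, hr]

-- ===== VERDICT (by name: the statement is the Claim_ definition above) =====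
theorem splitWithIndices_spec : Claim_equal_splitWithIndices := by
  intro text _
  unfold Spec_splitWithIndices splitWithIndices splitWithIndices_alt
  exact pvMain _ _ le_rfl 0 0
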